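-- pv_equiv track=rewrite | github.com/yihucd/advent_of_code_2025 | day6_p2.py | group_vertical_numbers
-- ===== SOURCE A (Python) =====
-- import collections
--
-- def group_vertical_numbers(strs_by_column, num_rows):
--     """Group vertical numbers that needs to be operated on together.
--
--     Args:
--         strs_by_column (list): A list of strings for each 'thin' column.
--         num_rows (int): Number of rows these numbers occupy.
--     Returns:
--         A dictionary of grouped lists of numbers by column.
--     """
--     group_count = 0
--     column_number_dict = collections.defaultdict(list)  # Key: a number Value: The number to be operated on
--
--     for str_by_column in strs_by_column:
--         if str_by_column == ' ' * num_rows:  # Found a space separator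
--             group_count += 1
--             continue
--         else:
--             stripped_str = str_by_column.strip()
--             if stripped_str != '':
--                 number_by_column = int(str_by_column)
--                 column_number_dict[group_count].append(number_by_column)
--
--     return column_number_dict
-- ===== SOURCE B (Python) =====
-- import collections
--
-- def group_vertical_numbers(strs_by_column, num_rows):
--     """Group vertical numbers: prefix-count table version.
--
--     Pass 1 marks separator columns and tabulates, for every position, how many
--     separators precede it; pass 2 files each numeric column under that
--     precomputed group index.
--     """
--     sep = ' ' * num_rows
--     is_sep = [s == sep for s in strs_by_column]
--     prefix = [0] * len(strs_by_column)
--     run = 0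
--     for i, f in enumerate(is_sep):
--         prefix[i] = run
--         if f:
--             run += 1
--     column_number_dict = collections.defaultdict(list)
--     for s, f, g in zip(strs_by_column, is_sep, prefix):
--         if not f and s.strip() != '':
--             column_number_dict[g].append(int(s))
--     return column_number_dict
-- ===== Notes on version B (the rewrite author's own statement) =====
-- stated objective: alternative
-- what changed: A threads a mutable group counter through a single loop; B first tabulates separator flags and a prefix-count of separators per position, then a second pass files each numeric column under its precomputed prefix count.
import Mathlib
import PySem

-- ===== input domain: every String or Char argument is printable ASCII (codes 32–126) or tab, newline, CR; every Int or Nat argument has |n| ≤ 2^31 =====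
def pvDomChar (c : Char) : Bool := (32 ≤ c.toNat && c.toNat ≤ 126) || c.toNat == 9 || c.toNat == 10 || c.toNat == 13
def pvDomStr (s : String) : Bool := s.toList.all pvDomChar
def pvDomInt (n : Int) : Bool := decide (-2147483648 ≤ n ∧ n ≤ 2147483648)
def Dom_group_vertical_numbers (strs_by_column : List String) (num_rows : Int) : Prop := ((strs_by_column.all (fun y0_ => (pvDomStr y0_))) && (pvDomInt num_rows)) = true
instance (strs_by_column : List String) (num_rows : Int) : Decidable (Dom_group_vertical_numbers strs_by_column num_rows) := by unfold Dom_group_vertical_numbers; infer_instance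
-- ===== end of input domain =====

-- B replaces A's running group counter by a precomputed separator-prefix-count table
-- consumed in a second pass (objective: alternative decomposition, same cost).

-- s == ' ' * num_rows, exactly: same length as the repetition and every char a space
-- (stated via length instead of materializing the repeated string, so it evaluates for large num_rows).
def pvSepEq (s : String) (num_rows : Int) : Bool :=
  (s.toList.length : Int) == max num_rows 0 && s.toList.all (· == ' ')

-- ===== PORT A =====
-- A's single loop: state = (group_count, defaultdict); d[g].append(int(s)) is modify g [] (· ++ [·]).
def group_vertical_numbers (strs_by_column : List String) (num_rows : Int) : List (Int × List Int) :=
  (strs_by_column.foldl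
    (fun (st : Int × PySem.Dict Int (List Int)) s =>
      if pvSepEq s num_rows then (st.1 + 1, st.2)
      else if PySem.Str.strip s ≠ "" then
        (st.1, st.2.modify st.1 [] (· ++ [(PySem.Int.ofStr? s).getD 0]))
      else st)
    (0, PySem.Dict.empty)).2.items

-- ===== PORT B =====
-- prefix[i] = number of separator columns strictly before position i
def pvPrefixCounts : List Bool → Int → List Int
  | [], _ => []
  | f :: fs, run => run :: pvPrefixCounts fs (run + (if f then 1 else 0))

def group_vertical_numbers_alt (strs_by_column : List String) (num_rows : Int) : List (Int × List Int) :=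
  let isSep := strs_by_column.map (fun s => pvSepEq s num_rows)
  let pref := pvPrefixCounts isSep 0
  ((strs_by_column.zip (isSep.zip pref)).foldl
    (fun (d : PySem.Dict Int (List Int)) p =>
      if !p.2.1 && PySem.Str.strip p.1 ≠ "" then
        d.modify p.2.2 [] (· ++ [(PySem.Int.ofStr? p.1).getD 0])
      else d)
    PySem.Dict.empty).items

-- ===== PRECONDITION & SPEC =====
-- Pre_ excludes exactly the inputs where A raises ValueError: a non-separator,
-- non-blank column whose text int() rejects.
def Pre_group_vertical_numbers (strs_by_column : List String) (num_rows : Int) : Prop :=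
  ∀ s ∈ strs_by_column,
    pvSepEq s num_rows = false →
    PySem.Str.strip s ≠ "" →
    (PySem.Int.ofStr? s).isSome
instance (strs_by_column : List String) (num_rows : Int) : Decidable (Pre_group_vertical_numbers strs_by_column num_rows) := by unfold Pre_group_vertical_numbers; infer_instance

def pvWitness_group_vertical_numbers : List String × Int := (["12", "  ", " 3"], 2)

def Spec_group_vertical_numbers (strs_by_column : List String) (num_rows : Int) (out : List (Int × List Int)) : Prop := out = group_vertical_numbers_alt strs_by_column num_rows
instance (strs_by_column : List String) (num_rows : Int) (out : List (Int × List Int)) : Decidable (Spec_group_vertical_numbers strs_by_column num_rows out) := by unfold Spec_group_vertical_numbers; infer_instance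

-- ===== CLAIM (what is proved, stated in full; the proofs are below) =====
def Claim_equal_group_vertical_numbers : Prop := ∀ (strs_by_column : List String) (num_rows : Int), Dom_group_vertical_numbers strs_by_column num_rows → Pre_group_vertical_numbers strs_by_column num_rows → Spec_group_vertical_numbers strs_by_column num_rows (group_vertical_numbers strs_by_column num_rows)

-- ===== LEMMAS AND PROOFS =====

-- A's fold from any state (c, d) equals B's table-driven fold whose prefix table starts at c.
theorem pv_fold_eq (n : Int) (xs : List String) (c : Int) (d : PySem.Dict Int (List Int)) :
    (xs.foldl
      (fun (st : Int × PySem.Dict Int (List Int)) s =>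
        if pvSepEq s n then (st.1 + 1, st.2)
        else if PySem.Str.strip s ≠ "" then
          (st.1, st.2.modify st.1 [] (· ++ [(PySem.Int.ofStr? s).getD 0]))
        else st)
      (c, d)).2
    = (xs.zip ((xs.map (fun s => pvSepEq s n)).zip (pvPrefixCounts (xs.map (fun s => pvSepEq s n)) c))).foldl
        (fun (d : PySem.Dict Int (List Int)) p =>
          if !p.2.1 && PySem.Str.strip p.1 ≠ "" then
            d.modify p.2.2 [] (· ++ [(PySem.Int.ofStr? p.1).getD 0])
          else d) d := by
  induction xs generalizing c d with
  | nil => rfl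
  | cons s xs ih =>
    simp only [List.map_cons, pvPrefixCounts, List.zip_cons_cons, List.foldl_cons]
    by_cases hs : pvSepEq s n = true
    · rw [if_pos hs, hs, if_neg (by simp)]
      simp only [if_true]
      exact ih _ _
    · have hb : pvSepEq s n = false := by simp at hs; exact hs
      rw [if_neg hs, hb]
      simp only [Bool.not_false, Bool.true_and, Bool.false_eq_true, if_false, add_zero]
      by_cases hstrip : PySem.Str.strip s = ""
      · rw [if_neg (fun h => h hstrip), if_neg (by simp [hstrip])]
        exact ih _ _
      · rw [if_pos hstrip, if_pos (by simp [hstrip])]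
        exact ih _ _

-- ===== VERDICT (by name: the statement is the Claim_ definition above) =====
theorem group_vertical_numbers_spec : Claim_equal_group_vertical_numbers := by
  intro xs n _ _
  unfold Spec_group_vertical_numbers group_vertical_numbers group_vertical_numbers_alt
  exact congrArg PySem.Dict.items (pv_fold_eq n xs 0 PySem.Dict.empty)
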